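-- pv_equiv track=rewrite | github.com/chilinwei/imagedetection | core.py | transcode
-- ===== SOURCE A (Python) =====
-- def transcode(arr):
-- 	labs = []
-- 	code = []
-- 	for ele in arr:
-- 		try:
-- 			idx = code.index(ele)
-- 		except:
-- 			idx = len(code)
-- 			code.insert(idx, ele)
-- 		labs.append(idx)
-- 	return labs, code
-- ===== SOURCE B (Python) =====
-- def transcode(arr):
--     code = [v for i, v in enumerate(arr) if v not in arr[:i]]
--     labs = [len(set(arr[:arr.index(v) + 1])) - 1 for v in arr]
--     return labs, code
-- ===== Notes on version B (the rewrite author's own statement) =====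
-- stated objective: alternative
-- what changed: Replaces A's single stateful loop (incrementally maintaining labs and code via try/index/insert) by stateless comprehensions: code filters first occurrences by prefix membership, and each label is computed as the number of distinct values up to that element's first occurrence minus one.
import Mathlib
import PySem

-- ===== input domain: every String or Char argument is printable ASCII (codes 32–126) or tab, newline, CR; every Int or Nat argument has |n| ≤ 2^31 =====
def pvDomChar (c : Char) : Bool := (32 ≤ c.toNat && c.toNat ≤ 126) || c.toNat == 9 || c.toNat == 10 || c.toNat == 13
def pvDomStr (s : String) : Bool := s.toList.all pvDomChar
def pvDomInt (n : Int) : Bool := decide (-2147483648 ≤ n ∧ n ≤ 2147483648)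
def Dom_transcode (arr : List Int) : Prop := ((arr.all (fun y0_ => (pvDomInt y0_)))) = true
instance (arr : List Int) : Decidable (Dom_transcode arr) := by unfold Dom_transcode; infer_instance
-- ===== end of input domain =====

-- B recomputes each label statelessly as (number of distinct values up to the element's first occurrence) - 1, instead of A's incremental index/insert loop; same cost, different algorithm.

-- ===== PORT A =====
-- A's loop: try idx = code.index(ele) / except: idx = len(code); code.insert(idx, ele); labs.append(idx)
def transcode (arr : List Int) : List Int × List Int :=
  arr.foldl (fun st ele =>
    match PySem.List.index? st.2 ele with
    | some idx => (st.1 ++ [(idx : Int)], st.2)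
    | none =>
        let idx : Int := PySem.List.len st.2
        (st.1 ++ [idx], PySem.List.insert st.2 idx ele)) ([], [])

-- ===== PORT B =====
-- code = [v for i, v in enumerate(arr) if v not in arr[:i]]
-- labs = [len(set(arr[:arr.index(v) + 1])) - 1 for v in arr]
-- (arr.index(v) always succeeds since v is drawn from arr; ported as index? with default 0, exact on every reachable call)
def transcode_alt (arr : List Int) : List Int × List Int :=
  let code := (PySem.List.enumerate arr).filterMap (fun p =>
    if p.2 ∈ PySem.List.slice arr none (some p.1) then none else some p.2)
  let labs := arr.map (fun v =>
    (PySem.Set.len (PySem.Set.ofList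
      (PySem.List.slice arr none (some ((((PySem.List.index? arr v).getD 0 : Nat) : Int) + 1)))) : Int) - 1)
  (labs, code)

-- ===== PRECONDITION & SPEC =====
def Spec_transcode (arr : List Int) (out : List Int × List Int) : Prop := out = transcode_alt arr
instance (arr : List Int) (out : List Int × List Int) : Decidable (Spec_transcode arr out) := by unfold Spec_transcode; infer_instance

-- ===== CLAIM (what is proved, stated in full; the proofs are below) =====
def Claim_equal_transcode : Prop := ∀ (arr : List Int), Dom_transcode arr → Spec_transcode arr (transcode arr)

-- ===== LEMMAS AND PROOFS =====

-- first-occurrence dedup extension of `code` by `rest`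
def pvUniq (code rest : List Int) : List Int :=
  match rest with
  | [] => code
  | x :: xs => pvUniq (if x ∈ code then code else code ++ [x]) xs

-- the elements `rest` newly contributes to `code`
def pvNew (code rest : List Int) : List Int :=
  match rest with
  | [] => []
  | x :: xs => if x ∈ code then pvNew code xs else x :: pvNew (code ++ [x]) xs

theorem pvUniq_eq_append_new (rest code : List Int) : pvUniq code rest = code ++ pvNew code rest := by
  induction rest generalizing code with
  | nil => simp [pvUniq, pvNew]
  | cons x xs ih =>
    by_cases h : x ∈ code
    · simp [pvUniq, pvNew, h, ih]
    · simp [pvUniq, pvNew, h, ih (code ++ [x])]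

theorem pvNew_congr (rest : List Int) : ∀ c1 c2 : List Int, (∀ y, y ∈ c1 ↔ y ∈ c2) →
    pvNew c1 rest = pvNew c2 rest := by
  induction rest with
  | nil => intro _ _ _; rfl
  | cons x xs ih =>
    intro c1 c2 h
    by_cases hx : x ∈ c1
    · simp [pvNew, hx, (h x).mp hx, ih c1 c2 h]
    · have hx2 : x ∉ c2 := fun hm => hx ((h x).mpr hm)
      simp only [pvNew, if_neg hx, if_neg hx2]
      exact congrArg (x :: ·) (ih _ _ (by intro y; simp [h y]))

theorem pvUniq_append (l1 l2 code : List Int) : pvUniq code (l1 ++ l2) = pvUniq (pvUniq code l1) l2 := by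
  induction l1 generalizing code with
  | nil => simp [pvUniq]
  | cons x xs ih => simp [pvUniq, ih]

theorem mem_pvUniq (rest : List Int) : ∀ code y, y ∈ pvUniq code rest ↔ y ∈ code ∨ y ∈ rest := by
  induction rest with
  | nil => intro code y; simp [pvUniq]
  | cons x xs ih =>
    intro code y
    by_cases h : x ∈ code
    · simp only [pvUniq, if_pos h, ih]
      constructor
      · rintro (hy | hy) <;> simp [hy]
      · rintro (hy | hy)
        · exact Or.inl hy
        · rcases List.mem_cons.mp hy with rfl | hy
          · exact Or.inl h
          · exact Or.inr hy
    · simp only [pvUniq, if_neg h, ih, List.mem_append, List.mem_cons]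
      tauto

theorem pvUniq_prefix (rest code : List Int) : ∃ ext, pvUniq code rest = code ++ ext :=
  ⟨pvNew code rest, pvUniq_eq_append_new rest code⟩

theorem pvIndex_uniq_of_mem (rest code : List Int) (y : Int) (h : y ∈ code) :
    PySem.List.index? (pvUniq code rest) y = PySem.List.index? code y := by
  obtain ⟨e, he⟩ := pvUniq_prefix rest code
  rw [he, PySem.List.index?_append_of_mem e h]

-- A's fold computes (labels = index into the final dedup, code = the dedup)
theorem pvA_char (rest : List Int) : ∀ (labs code : List Int),
    rest.foldl (fun st ele =>
      match PySem.List.index? st.2 ele with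
      | some idx => (st.1 ++ [(idx : Int)], st.2)
      | none =>
          let idx : Int := PySem.List.len st.2
          (st.1 ++ [idx], PySem.List.insert st.2 idx ele)) (labs, code)
    = (labs ++ rest.map (fun x => (((PySem.List.index? (pvUniq code rest) x).getD 0 : Nat) : Int)),
       pvUniq code rest) := by
  induction rest with
  | nil => intro labs code; simp [pvUniq]
  | cons x xs ih =>
    intro labs code
    by_cases h : x ∈ code
    · obtain ⟨k, hk⟩ := Option.isSome_iff_exists.mp ((PySem.List.index?_isSome_iff code x).mpr h)
      have hux : pvUniq code (x :: xs) = pvUniq code xs := by simp [pvUniq, h]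
      simp only [List.foldl_cons, hk, List.map_cons, hux]
      rw [ih (labs ++ [(k : Int)]) code]
      have hidx : PySem.List.index? (pvUniq code xs) x = some k := by
        rw [pvIndex_uniq_of_mem xs code x h, hk]
      rw [hidx]
      simp only [Option.getD_some, List.append_assoc, List.singleton_append]
    · have hnone : PySem.List.index? code x = none :=
        (PySem.List.index?_eq_none_iff code x).mpr h
      have hins : PySem.List.insert code (PySem.List.len code) x = code ++ [x] :=
        PySem.List.insert_len code x
      have hux : pvUniq code (x :: xs) = pvUniq (code ++ [x]) xs := by simp [pvUniq, h]
      simp only [List.foldl_cons, hnone, hins, List.map_cons, hux]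
      rw [ih (labs ++ [PySem.List.len code]) (code ++ [x])]
      have hx : PySem.List.index? (pvUniq (code ++ [x]) xs) x = some code.length := by
        rw [pvIndex_uniq_of_mem xs (code ++ [x]) x (by simp),
            PySem.List.index?_append_singleton_self code x h]
      rw [hx]
      simp only [Option.getD_some, PySem.List.len_eq, List.append_assoc, List.singleton_append]

-- PySem.Set.ofList is the same dedup
theorem pvSet_ofList_eq_pvUniq (l : List Int) : ∀ code, l.foldl PySem.Set.add code = pvUniq code l := by
  induction l with
  | nil => intro code; rfl
  | cons x xs ih =>
    intro code
    simp only [List.foldl_cons, pvUniq]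
    rw [ih]
    congr 1
    by_cases h : x ∈ code <;> simp [PySem.Set.add, h]

-- B's code comprehension computes the new elements of the dedup
theorem pvB_code (xs : List Int) : ∀ pre : List Int,
    (PySem.List.enumerate xs (pre.length : Int)).filterMap (fun p =>
      if p.2 ∈ PySem.List.slice (pre ++ xs) none (some p.1) then none else some p.2)
    = pvNew pre xs := by
  induction xs with
  | nil => intro pre; simp [PySem.List.enumerate, pvNew]
  | cons x xs ih =>
    intro pre
    rw [PySem.List.enumerate_cons]
    have hslice : PySem.List.slice (pre ++ x :: xs) none (some (pre.length : Int)) = pre := by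
      rw [PySem.List.slice_to_natCast]
      simp
    have hrec : (PySem.List.enumerate xs ((pre.length : Int) + 1)).filterMap (fun p =>
        if p.2 ∈ PySem.List.slice (pre ++ x :: xs) none (some p.1) then none else some p.2)
        = pvNew (pre ++ [x]) xs := by
      have h1 : ((pre.length : Int) + 1) = ((pre ++ [x]).length : Int) := by simp
      have h2 : pre ++ x :: xs = (pre ++ [x]) ++ xs := by simp
      rw [h1, h2]
      exact ih (pre ++ [x])
    by_cases h : x ∈ pre
    · simp only [List.filterMap_cons, hslice, hrec, pvNew, if_pos h]
      refine pvNew_congr xs (pre ++ [x]) pre ?_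
      intro y
      simp only [List.mem_append, List.mem_singleton]
      exact ⟨fun hy => hy.elim id (fun e => e ▸ h), Or.inl⟩
    · simp only [List.filterMap_cons, hslice, hrec, pvNew, if_neg h]

-- B's label of v equals the index of v in the full dedup
theorem pvB_lab (arr : List Int) (v : Int) (hv : v ∈ arr) :
    (PySem.Set.len (PySem.Set.ofList
      (PySem.List.slice arr none (some ((((PySem.List.index? arr v).getD 0 : Nat) : Int) + 1)))) : Int) - 1
    = (((PySem.List.index? (pvUniq [] arr) v).getD 0 : Nat) : Int) := by
  obtain ⟨k, hk⟩ := Option.isSome_iff_exists.mp ((PySem.List.index?_isSome_iff arr v).mpr hv)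
  obtain ⟨p, s, harr, hlen, hnp⟩ := (PySem.List.index?_eq_some_iff arr v k).mp hk
  have hvnup : v ∉ pvUniq [] p := by
    rw [mem_pvUniq]; simpa using hnp
  have htake : PySem.List.slice arr none (some (((k : Nat) : Int) + 1)) = p ++ [v] := by
    have : ((k : Nat) : Int) + 1 = (((k + 1 : Nat) : Int)) := by push_cast; ring
    rw [this, PySem.List.slice_to_natCast, harr, ← hlen]
    simp [List.take_append]
  have hofl : PySem.Set.ofList (p ++ [v]) = pvUniq [] p ++ [v] := by
    rw [PySem.Set.ofList_eq_foldl, pvSet_ofList_eq_pvUniq, pvUniq_append]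
    simp [pvUniq, hvnup]
  have hidx : PySem.List.index? (pvUniq [] arr) v = some (pvUniq [] p).length := by
    have : pvUniq [] arr = pvUniq (pvUniq [] p ++ [v]) s := by
      rw [harr, show p ++ v :: s = (p ++ [v]) ++ s by simp, pvUniq_append, pvUniq_append]
      simp [pvUniq, hvnup]
    rw [this, pvIndex_uniq_of_mem s _ v (by simp),
        PySem.List.index?_append_singleton_self _ v hvnup]
  rw [hk, hidx]
  simp only [Option.getD_some]
  rw [htake, hofl]
  simp [PySem.Set.len]

-- ===== VERDICT (by name: the statement is the Claim_ definition above) =====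
theorem transcode_spec : Claim_equal_transcode := by
  intro arr _
  unfold Spec_transcode transcode transcode_alt
  rw [pvA_char arr [] []]
  refine Prod.ext ?_ ?_
  · simp only [List.nil_append]
    exact (List.map_congr_left (fun v hv => (pvB_lab arr v hv).symm))
  · have h := pvB_code arr []
    simp only [List.nil_append, List.length_nil, Nat.cast_zero] at h
    rw [pvUniq_eq_append_new, List.nil_append]
    exact h.symm
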